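-- pv_equiv track=rewrite | github.com/rebuilder945/FL_research | ast_research/python_code_5.23/lastterm_page7/success_code/程明熙-3225-2023-04-26_13_51_36.py | work
-- ===== SOURCE A (Python) =====
-- def work(a) :
--  dic={}
--  for i in range(0,a):
--   if i==0:
--    dic[i]=1
--   else:
--    dic[i]=dic[i-1]*i
--  return dic
-- ===== SOURCE B (Python) =====
-- def fact(i):
--     r = 1
--     for j in range(1, i + 1):
--         r *= j
--     return r
--
-- def work(a):
--     return {i: fact(i) for i in range(a)}
-- ===== Notes on version B (the rewrite author's own statement) =====
-- stated objective: alternative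
-- what changed: B drops A's running-product recurrence (dic[i]=dic[i-1]*i) and builds the dict with a comprehension that recomputes each factorial i! independently from scratch.
import Mathlib
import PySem

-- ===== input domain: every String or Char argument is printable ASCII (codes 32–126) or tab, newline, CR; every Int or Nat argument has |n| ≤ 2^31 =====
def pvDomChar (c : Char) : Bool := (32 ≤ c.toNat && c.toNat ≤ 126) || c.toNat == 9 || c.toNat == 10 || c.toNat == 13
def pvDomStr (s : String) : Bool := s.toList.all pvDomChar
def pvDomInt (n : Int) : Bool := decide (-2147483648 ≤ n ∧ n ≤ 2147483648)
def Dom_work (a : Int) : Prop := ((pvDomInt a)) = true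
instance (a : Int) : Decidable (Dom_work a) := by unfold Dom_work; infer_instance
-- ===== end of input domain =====

-- B replaces A's incremental recurrence dic[i]=dic[i-1]*i with independent recomputation of
-- each factorial (alternative decomposition; not faster).

-- ===== PORT A =====
-- dic[i-1] is ported as getD (i-1) 0: for every i ≥ 1 reached here the key i-1 was inserted
-- in the previous iteration, so the lookup never falls back to the default (exact).
def work (a : Int) : List (Int × Int) :=
  ((PySem.List.pyRange 0 a 1).foldl
    (fun (dic : PySem.Dict Int Int) i =>
      if i == 0 then dic.insert i 1 else dic.insert i (dic.getD (i - 1) 0 * i))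
    PySem.Dict.empty).items

-- ===== PORT B =====
def fact (i : Int) : Int :=
  (PySem.List.pyRange 1 (i + 1) 1).foldl (fun r j => r * j) 1

def work_alt (a : Int) : List (Int × Int) :=
  (PySem.List.pyRange 0 a 1).map (fun i => (i, fact i))

-- ===== PRECONDITION & SPEC =====
def Spec_work (a : Int) (out : List (Int × Int)) : Prop := out = work_alt a
instance (a : Int) (out : List (Int × Int)) : Decidable (Spec_work a out) := by unfold Spec_work; infer_instance

-- ===== CLAIM (what is proved, stated in full; the proofs are below) =====
def Claim_equal_work : Prop := ∀ (a : Int), Dom_work a → Spec_work a (work a)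

-- ===== LEMMAS AND PROOFS =====

def workStep (dic : PySem.Dict Int Int) (i : Int) : PySem.Dict Int Int :=
  if i == 0 then dic.insert i 1 else dic.insert i (dic.getD (i - 1) 0 * i)

lemma fact_succ (n : Nat) : fact ((n : Int) + 1) = fact n * ((n : Int) + 1) := by
  unfold fact
  rw [PySem.List.pyRange_one_succ_right (by omega : (1 : Int) ≤ (n : Int) + 1)]
  simp

lemma getD_factDict (m : Nat) (k : Int) (hk0 : 0 ≤ k) (hkm : k < (m : Int)) :
    (PySem.Dict.mk ((PySem.List.pyRange 0 m 1).map (fun i => (i, fact i)))).getD k 0 = fact k := by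
  apply PySem.Dict.getD_of_mem_items
  · exact List.mem_map.mpr ⟨k, PySem.List.mem_pyRange_one.mpr ⟨hk0, hkm⟩, rfl⟩
  · show (((PySem.List.pyRange 0 m 1).map (fun i => (i, fact i))).map Prod.fst).Nodup
    rw [List.map_map]
    have h : (Prod.fst ∘ fun i : Int => (i, fact i)) = id := rfl
    rw [h, List.map_id]
    exact PySem.List.nodup_pyRange_one 0 m

lemma loop_eq (n : Nat) :
    (PySem.List.pyRange 0 n 1).foldl workStep PySem.Dict.empty
      = PySem.Dict.mk ((PySem.List.pyRange 0 n 1).map (fun i => (i, fact i))) := by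
  induction n with
  | zero => simp; rfl
  | succ n ih =>
    have hsplit : PySem.List.pyRange 0 ((n : Int) + 1) 1
        = PySem.List.pyRange 0 n 1 ++ [(n : Int)] :=
      PySem.List.pyRange_one_succ_right (by positivity)
    push_cast
    rw [hsplit, List.foldl_append, List.map_append, ih]
    simp only [List.foldl_cons, List.foldl_nil, List.map_cons, List.map_nil]
    unfold workStep
    by_cases h0 : (n : Int) = 0
    · have hn0 : n = 0 := by exact_mod_cast h0
      subst hn0
      simp
      rfl
    · have hn : 0 < (n : Int) := by omega
      simp only [beq_iff_eq, h0, if_false]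
      rw [getD_factDict n ((n : Int) - 1) (by omega) (by omega)]
      have hnc : (PySem.Dict.mk ((PySem.List.pyRange 0 n 1).map (fun i => (i, fact i)))).contains (n : Int) = false := by
        rw [PySem.Dict.contains_eq_decide_mem_keys]
        simp only [PySem.Dict.keys_mk, List.map_map]
        have : ((PySem.List.pyRange 0 n 1).map (Prod.fst ∘ fun i => (i, fact i)))
            = PySem.List.pyRange 0 n 1 := by
          simp only [Function.comp_def]
          exact List.map_id' _
        rw [this]
        simp only [decide_eq_false_iff_not, PySem.List.mem_pyRange_one]
        omega
      apply PySem.Dict.ext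
      rw [PySem.Dict.items_insert_of_not_contains (h := hnc)]
      have : fact ((n : Int) - 1) * (n : Int) = fact (n : Int) := by
        obtain ⟨m, rfl⟩ : ∃ m : Nat, n = m + 1 := ⟨n - 1, by omega⟩
        push_cast
        rw [show (m : Int) + 1 - 1 = (m : Int) by ring, fact_succ]
      rw [this]

-- ===== VERDICT (by name: the statement is the Claim_ definition above) =====
theorem work_spec : Claim_equal_work := by
  intro a _
  unfold Spec_work work work_alt
  by_cases h : a ≤ 0
  · rw [PySem.List.pyRange_one_eq_nil h]
    rfl
  · have ha : a = ((a.toNat : Nat) : Int) := by omega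
    rw [ha]
    show ((PySem.List.pyRange 0 a.toNat 1).foldl workStep PySem.Dict.empty).items = _
    rw [loop_eq]
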